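-- pv_equiv track=rewrite | github.com/db117/algorithm | src/main/java/cn/db117/leetcode/solution38/Solution_3827.py | countMonobit
-- ===== SOURCE A (Python) =====
-- def countMonobit(n: int) -> int:
--     ans = 0
--     for k in range(32):
--         x = (1 << k) - 1  # 2^k - 1
--         if x > n:
--             break
--         ans += 1
--
--     return ans
-- ===== SOURCE B (Python) =====
-- def countMonobit(n: int) -> int:
--     # closed form: the count of nonnegative k with 2**k <= n+1 is bit_length(n+1), capped at the loop bound
--     return min((n + 1).bit_length(), 32) if n >= 0 else 0
-- ===== Notes on version B (the rewrite author's own statement) =====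
-- stated objective: simpler
-- what changed: Replaced the bounded loop that counts powers of two not exceeding n+1 with a single closed-form bit_length computation capped at the loop bound (negative inputs yield an empty count).
import Mathlib
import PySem

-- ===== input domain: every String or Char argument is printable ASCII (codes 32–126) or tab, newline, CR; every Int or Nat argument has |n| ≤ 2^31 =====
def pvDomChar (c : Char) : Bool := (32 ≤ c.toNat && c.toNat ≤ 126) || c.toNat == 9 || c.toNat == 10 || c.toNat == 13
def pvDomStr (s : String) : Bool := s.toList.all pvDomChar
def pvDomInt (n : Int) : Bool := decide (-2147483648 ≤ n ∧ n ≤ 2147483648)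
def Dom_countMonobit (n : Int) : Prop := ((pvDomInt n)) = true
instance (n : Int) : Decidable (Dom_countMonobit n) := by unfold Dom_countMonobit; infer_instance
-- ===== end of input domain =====

-- B replaces A's bounded counting loop by a closed form via bit_length; objective: simpler.
-- ===== PORT A =====
-- for k in range(32): x = (1 << k) - 1; if x > n: break; ans += 1
def countMonobitLoop (n : Int) (k : Nat) (ans : Int) : Int :=
  if h : k < 32 then
    if (2 ^ k : Int) - 1 > n then ans
    else countMonobitLoop n (k + 1) (ans + 1)
  else ans
termination_by 32 - k

def countMonobit (n : Int) : Int := countMonobitLoop n 0 0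

-- ===== PORT B =====
-- Python int.bit_length on a nonnegative argument
def pyBitLength (m : Nat) : Nat := if m = 0 then 0 else Nat.log2 m + 1

def countMonobit_alt (n : Int) : Int :=
  if n ≥ 0 then min (Int.ofNat (pyBitLength (n + 1).toNat)) 32 else 0

-- ===== PRECONDITION & SPEC =====
def Spec_countMonobit (n : Int) (out : Int) : Prop := out = countMonobit_alt n
instance (n : Int) (out : Int) : Decidable (Spec_countMonobit n out) := by unfold Spec_countMonobit; infer_instance

-- ===== CLAIM (what is proved, stated in full; the proofs are below) =====
def Claim_equal_countMonobit : Prop := ∀ (n : Int), Dom_countMonobit n → Spec_countMonobit n (countMonobit n)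

-- ===== LEMMAS AND PROOFS =====

-- loop characterisation: once 2^k ≤ n+1, the loop's value is a + min (log2 (n+1) + 1) 32 - k
theorem countMonobitLoop_char (j : Nat) : ∀ (k : Nat) (a n : Int), k + j = 32 → 0 ≤ n →
    2 ^ k ≤ (n + 1).toNat →
    countMonobitLoop n k a = a + (min (Nat.log2 (n + 1).toNat + 1) 32 : Nat) - k := by
  induction j with
  | zero =>
    intro k a n hk hn hpow
    have hk32 : k = 32 := by omega
    subst hk32
    have hm0 : (n + 1).toNat ≠ 0 := by omega
    have hlog : 32 ≤ Nat.log2 ((n + 1).toNat) := (Nat.le_log2 hm0).mpr hpow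
    rw [countMonobitLoop]
    simp only [show ¬(32 < 32) by omega, dite_false]
    omega
  | succ j ih =>
    intro k a n hk hn hpow
    have hklt : k < 32 := by omega
    have hm0 : (n + 1).toNat ≠ 0 := by omega
    have hcast : ((((n+1).toNat : Nat) : Int)) = n + 1 := Int.toNat_of_nonneg (by omega)
    have hcond : ¬ ((2 ^ k : Int) - 1 > n) := by
      have : ((2 ^ k : Nat) : Int) ≤ (((n+1).toNat : Nat) : Int) := by exact_mod_cast hpow
      push_cast at this
      omega
    rw [countMonobitLoop]
    simp only [hklt, dite_true, hcond, if_false]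
    by_cases hnext : 2 ^ (k + 1) ≤ (n + 1).toNat
    · have := ih (k + 1) (a + 1) n (by omega) hn hnext
      rw [this]; omega
    · -- log2 (n+1) = k here
      have hlogk : Nat.log2 ((n + 1).toNat) = k := by
        have h1 : k ≤ Nat.log2 ((n + 1).toNat) := (Nat.le_log2 hm0).mpr hpow
        have h2 : Nat.log2 ((n + 1).toNat) < k + 1 :=
          (Nat.log2_lt hm0).mpr (by omega)
        omega
      rw [countMonobitLoop]
      by_cases hk1 : k + 1 < 32
      · have hcond2 : (2 ^ (k + 1) : Int) - 1 > n := by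
          have : (((n+1).toNat : Nat) : Int) < ((2 ^ (k+1) : Nat) : Int) := by exact_mod_cast (by omega : (n+1).toNat < 2 ^ (k+1))
          push_cast at this
          omega
        simp only [hk1, dite_true, hcond2, if_true]
        rw [hlogk]; omega
      · simp only [hk1, dite_false]
        rw [hlogk]; omega

theorem countMonobit_closed (n : Int) : countMonobit n = countMonobit_alt n := by
  unfold countMonobit countMonobit_alt
  by_cases hn : 0 ≤ n
  · have hpow : 2 ^ 0 ≤ (n + 1).toNat := by
      simp [pow_zero]; omega
    have := countMonobitLoop_char 32 0 0 n (by omega) hn hpow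
    rw [this]
    have hm0 : (n + 1).toNat ≠ 0 := by omega
    simp only [pyBitLength, hm0, if_false, ge_iff_le, hn, if_true, Int.ofNat_eq_natCast]
    push_cast
    omega
  · have hcond : (2 ^ 0 : Int) - 1 > n := by omega
    rw [countMonobitLoop]
    simp only [show (0:Nat) < 32 by omega, dite_true, hcond, if_true]
    simp [show ¬ n ≥ 0 by omega]

-- ===== VERDICT =====
theorem countMonobit_spec : Claim_equal_countMonobit := by
  intro n _
  unfold Spec_countMonobit
  exact countMonobit_closed n
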